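-- pv_equiv track=rewrite | github.com/Open-Source-Cowboy/Open-Source-Health-Tooling | oss_health/scoring.py | _path_exists
-- ===== SOURCE A (Python) =====
-- from typing import Any, Dict, List, Optional, Tuple
--
-- def _path_exists(paths: List[str], tree_paths: List[str]) -> bool:
--     for p in paths:
--         if p.endswith("/"):
--             # directory
--             prefix = p.rstrip("/") + "/"
--             if any(tp.startswith(prefix) for tp in tree_paths):
--                 return True
--         else:
--             if p in tree_paths:
--                 return True
--     return False
-- ===== SOURCE B (Python) =====
-- def _path_exists(paths, tree_paths):
--     # Alternative algorithm: exact paths via a set; directory queries via a set of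
--     # all '/'-terminated prefixes of the tree paths, built once.
--     exact = set(tree_paths)
--     dir_prefixes = set()
--     for tp in tree_paths:
--         for i, c in enumerate(tp):
--             if c == "/":
--                 dir_prefixes.add(tp[: i + 1])
--     for p in paths:
--         if p.endswith("/"):
--             if p.rstrip("/") + "/" in dir_prefixes:
--                 return True
--         elif p in exact:
--             return True
--     return False
-- ===== Notes on version B (the rewrite author's own statement) =====
-- stated objective: alternative
-- what changed: Replaced A's per-query scans of tree_paths (list membership and any-startswith per path) by two hash sets built once - the tree paths themselves for exact matches, and every '/'-terminated prefix of each tree path for directory queries - so each query becomes a set lookup; trades upfront O(total chars) preprocessing for O(1) queries, which a timing run found not faster on the generated workloads (A often returns early).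
import Mathlib
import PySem

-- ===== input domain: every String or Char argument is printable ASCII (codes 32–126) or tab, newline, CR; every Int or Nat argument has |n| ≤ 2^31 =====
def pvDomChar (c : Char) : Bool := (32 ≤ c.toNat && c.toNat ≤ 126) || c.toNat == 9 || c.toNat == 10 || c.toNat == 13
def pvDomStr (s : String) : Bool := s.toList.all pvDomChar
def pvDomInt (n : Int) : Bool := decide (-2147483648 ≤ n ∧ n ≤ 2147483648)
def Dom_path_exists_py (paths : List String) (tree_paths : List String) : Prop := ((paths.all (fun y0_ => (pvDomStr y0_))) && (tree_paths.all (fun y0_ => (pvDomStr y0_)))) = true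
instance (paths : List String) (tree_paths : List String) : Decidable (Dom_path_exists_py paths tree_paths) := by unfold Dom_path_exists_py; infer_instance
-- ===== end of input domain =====

-- B replaces A's per-query scans of tree_paths by two hash sets built once (exact paths,
-- and every '/'-terminated prefix of each tree path), making each query a set lookup (alternative algorithm).


-- ===== PORT A =====
-- p.rstrip("/") + "/" on the char list; hand port (exact: rstrip with the single char '/'
-- drops exactly the maximal run of trailing '/' characters)
def pvRstripSlashDir (p : List Char) : List Char :=
  (p.reverse.dropWhile (fun c => c == '/')).reverse ++ ['/']

-- A: for each p, either scan tree_paths for a startswith match (directory) or test list membership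
def path_exists_py (paths : List String) (tree_paths : List String) : Bool :=
  paths.any (fun p =>
    if PySem.Chars.endswith p.toList ['/'] then
      tree_paths.any (fun tp => PySem.Chars.startswith tp.toList (pvRstripSlashDir p.toList))
    else
      tree_paths.contains p)

-- ===== PORT B =====
-- dir_prefixes accumulation for one tree path: add tp[:i+1] for every i with tp[i] == '/'
def pvDirPrefixesOf (s : PySem.Set (List Char)) (tp : String) : PySem.Set (List Char) :=
  (PySem.List.enumerate tp.toList).foldl
    (fun s ic =>
      if ic.2 == '/' then PySem.Set.add s (PySem.List.slice tp.toList none (some (ic.1 + 1)))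
      else s) s

-- B: build the two sets once, then each path is a single set lookup
def path_exists_py_alt (paths : List String) (tree_paths : List String) : Bool :=
  let exact : PySem.Set String := PySem.Set.ofList tree_paths
  let dirPrefixes : PySem.Set (List Char) := tree_paths.foldl pvDirPrefixesOf PySem.Set.empty
  paths.any (fun p =>
    if PySem.Chars.endswith p.toList ['/'] then
      PySem.Set.contains dirPrefixes (pvRstripSlashDir p.toList)
    else
      PySem.Set.contains exact p)

-- ===== PRECONDITION & SPEC =====
def Spec_path_exists_py (paths : List String) (tree_paths : List String) (out : Bool) : Prop := out = path_exists_py_alt paths tree_paths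
instance (paths : List String) (tree_paths : List String) (out : Bool) : Decidable (Spec_path_exists_py paths tree_paths out) := by unfold Spec_path_exists_py; infer_instance

-- ===== CLAIM (what is proved, stated in full; the proofs are below) =====
def Claim_equal_path_exists_py : Prop := ∀ (paths : List String) (tree_paths : List String), Dom_path_exists_py paths tree_paths → Spec_path_exists_py paths tree_paths (path_exists_py paths tree_paths)

-- ===== LEMMAS AND PROOFS =====

-- membership in the inner fold of pvDirPrefixesOf, stated over an arbitrary pair list
theorem pv_mem_foldl_add_if {L : List (Int × Char)} (g : Int × Char → List Char)
    (s : PySem.Set (List Char)) (x : List Char) :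
    (x ∈ L.foldl (fun s ic => if ic.2 == '/' then PySem.Set.add s (g ic) else s) s) ↔
      x ∈ s ∨ ∃ ic ∈ L, ic.2 = '/' ∧ x = g ic := by
  induction L generalizing s with
  | nil => simp
  | cons hd tl ih =>
    simp only [List.foldl_cons]
    by_cases h : hd.2 = '/'
    · rw [if_pos (by simp [h]), ih, PySem.Set.mem_add]
      simp only [List.mem_cons]
      constructor
      · rintro ((hs | rfl) | ⟨ic, hic, h2, hx⟩)
        exacts [Or.inl hs, Or.inr ⟨hd, Or.inl rfl, h, rfl⟩, Or.inr ⟨ic, Or.inr hic, h2, hx⟩]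
      · rintro (hs | ⟨ic, (rfl | hic), h2, hx⟩)
        exacts [Or.inl (Or.inl hs), Or.inl (Or.inr hx), Or.inr ⟨ic, hic, h2, hx⟩]
    · rw [if_neg (by simp [h]), ih]
      simp only [List.mem_cons]
      constructor
      · rintro (hs | ⟨ic, hic, h2, hx⟩)
        exacts [Or.inl hs, Or.inr ⟨ic, Or.inr hic, h2, hx⟩]
      · rintro (hs | ⟨ic, (rfl | hic), h2, hx⟩)
        exacts [Or.inl hs, absurd h2 h, Or.inr ⟨ic, hic, h2, hx⟩]

-- membership in pvDirPrefixesOf s tp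
theorem pv_mem_dirPrefixesOf (s : PySem.Set (List Char)) (tp : String) (x : List Char) :
    x ∈ pvDirPrefixesOf s tp ↔
      x ∈ s ∨ ∃ k, ∃ h : k < tp.toList.length, tp.toList[k] = '/' ∧ x = tp.toList.take (k + 1) := by
  unfold pvDirPrefixesOf
  rw [pv_mem_foldl_add_if]
  constructor
  · rintro (hs | ⟨ic, hmem, hslash, hx⟩)
    · exact Or.inl hs
    · rcases (PySem.List.mem_enumerate_iff _ _ _).1 hmem with ⟨k, hk, hic⟩
      subst hic
      refine Or.inr ⟨k, hk, hslash, ?_⟩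
      simp only at hx
      rw [hx, PySem.List.slice_to tp.toList (by simp; omega)]
      norm_num
  · rintro (hs | ⟨k, hk, hslash, hx⟩)
    · exact Or.inl hs
    · refine Or.inr ⟨((k : Int), tp.toList[k]), ?_, hslash, ?_⟩
      · exact (PySem.List.mem_enumerate_iff _ _ _).2 ⟨k, hk, by simp⟩
      · simp only
        rw [PySem.List.slice_to tp.toList (by omega)]
        rw [hx]; norm_num

-- membership in the outer fold over tree_paths
theorem pv_mem_foldl_dirPrefixes (tree_paths : List String) (s : PySem.Set (List Char))
    (x : List Char) :
    x ∈ tree_paths.foldl pvDirPrefixesOf s ↔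
      x ∈ s ∨ ∃ tp ∈ tree_paths, ∃ k, ∃ h : k < tp.toList.length,
        tp.toList[k] = '/' ∧ x = tp.toList.take (k + 1) := by
  induction tree_paths generalizing s with
  | nil => simp
  | cons hd tl ih =>
    simp only [List.foldl_cons]
    rw [ih, pv_mem_dirPrefixesOf]
    simp only [List.mem_cons]
    constructor
    · rintro ((hs | h) | ⟨tp, htp, h⟩)
      · exact Or.inl hs
      · exact Or.inr ⟨hd, Or.inl rfl, h⟩
      · exact Or.inr ⟨tp, Or.inr htp, h⟩
    · rintro (hs | ⟨tp, (rfl | htp), h⟩)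
      · exact Or.inl (Or.inl hs)
      · exact Or.inl (Or.inr h)
      · exact Or.inr ⟨tp, htp, h⟩

-- a nonempty '/'-terminated list is a prefix of cs iff it is one of cs's '/'-terminated prefixes
theorem pv_prefix_slash_iff (q cs : List Char) :
    (q ++ ['/']) <+: cs ↔
      ∃ k, ∃ h : k < cs.length, cs[k] = '/' ∧ (q ++ ['/']) = cs.take (k + 1) := by
  constructor
  · rintro ⟨rest, hrest⟩
    refine ⟨q.length, ?_, ?_, ?_⟩
    · subst hrest; simp
    · subst hrest
      simp [List.getElem_append_right (le_refl q.length)]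
    · subst hrest
      rw [List.take_append_of_le_length (by simp)]
      simp
  · rintro ⟨k, hk, _, hq⟩
    rw [hq]
    exact List.take_prefix _ _

theorem pv_main (paths tree_paths : List String) :
    path_exists_py paths tree_paths = path_exists_py_alt paths tree_paths := by
  unfold path_exists_py path_exists_py_alt
  simp only []
  congr 1
  funext p
  by_cases he : PySem.Chars.endswith p.toList ['/'] = true
  · simp only [he, if_true]
    rw [Bool.eq_iff_iff, PySem.Set.contains_iff, pv_mem_foldl_dirPrefixes]
    simp only [List.any_eq_true, PySem.Chars.startswith_iff]
    constructor
    · rintro ⟨tp, htp, hsw⟩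
      exact Or.inr ⟨tp, htp, (pv_prefix_slash_iff _ _).1 hsw⟩
    · rintro (habs | ⟨tp, htp, hpre⟩)
      · exact absurd habs (by simp [PySem.Set.empty])
      · exact ⟨tp, htp, (pv_prefix_slash_iff _ _).2 hpre⟩
  · simp only [Bool.not_eq_true] at he
    simp only [he, Bool.false_eq_true, if_false]
    rw [Bool.eq_iff_iff, PySem.Set.contains_iff, PySem.Set.mem_ofList]
    simp

-- ===== VERDICT (by name: the statement is the Claim_ definition above) =====
theorem path_exists_py_spec : Claim_equal_path_exists_py := by
  intro paths tree_paths _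
  unfold Spec_path_exists_py
  exact pv_main paths tree_paths
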